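-- pv_equiv track=rewrite | github.com/starosvDAV/starosvitskyi_pythonCource | homework3/movie_data_fetcher/prepare_user_data.py | group_data_by_decade_country
-- ===== SOURCE A (Python) =====
-- from collections import defaultdict, Counter
--
-- def group_data_by_decade_country(rows):
--     grouped = defaultdict(lambda: defaultdict(list))
--     for row in rows:
--         year = int(row.get("dob.year", 0))
--         if year < 1960:
--             continue
--         decade = f"{year // 10 * 10}-th"
--         country = row.get("location.country", "Unknown")
--         grouped[decade][country].append(row)
--     return grouped
-- ===== SOURCE B (Python) =====
-- def group_data_by_decade_country(rows):
--     triples = []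
--     for row in rows:
--         year = int(row.get("dob.year", 0))
--         if year >= 1960:
--             triples.append((f"{year // 10 * 10}-th", row.get("location.country", "Unknown"), row))
--     return {d: {c: [r for d2, c2, r in triples if d2 == d and c2 == c]
--                 for c in dict.fromkeys(c2 for d2, c2, _ in triples if d2 == d)}
--             for d in dict.fromkeys(d for d, _, _ in triples)}
-- ===== Notes on version B (the rewrite author's own statement) =====
-- stated objective: alternative
-- what changed: B makes one parsing/filtering pass into (decade, country, row) triples and then builds the nested result with dict comprehensions over first-occurrence key lists (dict.fromkeys) and per-key filters, instead of A's incremental mutation of a nested defaultdict.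
import Mathlib
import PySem

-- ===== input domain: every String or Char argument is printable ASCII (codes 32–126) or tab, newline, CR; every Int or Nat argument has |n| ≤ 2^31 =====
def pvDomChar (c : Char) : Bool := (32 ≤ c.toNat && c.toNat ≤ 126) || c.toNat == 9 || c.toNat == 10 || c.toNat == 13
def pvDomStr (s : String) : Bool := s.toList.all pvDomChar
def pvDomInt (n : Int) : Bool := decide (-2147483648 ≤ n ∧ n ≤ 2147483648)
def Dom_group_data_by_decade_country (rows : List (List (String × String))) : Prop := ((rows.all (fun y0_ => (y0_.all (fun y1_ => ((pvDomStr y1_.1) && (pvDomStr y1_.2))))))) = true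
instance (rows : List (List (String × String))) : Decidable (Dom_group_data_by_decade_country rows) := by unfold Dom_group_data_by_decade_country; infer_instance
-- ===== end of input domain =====

-- B builds the grouping by comprehensions over deduplicated keys instead of A's incremental
-- nested-defaultdict mutation (objective: alternative; same return value).

-- ===== PORT A =====
-- shared helpers (both Pythons compute these identical subexpressions)
-- int(row.get("dob.year", 0)): none = ValueError (excluded by Pre_)
def pvYear (row : List (String × String)) : Option Int :=
  match PySem.Dict.get? (PySem.Dict.mk row) "dob.year" with
  | none => some 0
  | some s => PySem.Int.ofStr? s

-- f"{year // 10 * 10}-th"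
def pvDecade (y : Int) : String := PySem.Int.toStr (PySem.Int.floordiv y 10 * 10) ++ "-th"

-- row.get("location.country", "Unknown")
def pvCountry (row : List (String × String)) : String :=
  PySem.Dict.getD (PySem.Dict.mk row) "location.country" "Unknown"

-- one iteration of A's loop; state none = the ValueError already happened (outside Pre_)
def pvStepA (og : Option (PySem.Dict String (PySem.Dict String (List (List (String × String))))))
    (row : List (String × String)) :
    Option (PySem.Dict String (PySem.Dict String (List (List (String × String))))) :=
  match og with
  | none => none
  | some g =>
    match pvYear row with
    | none => none
    | some y =>
      if y < 1960 then some g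
      else some (g.modify (pvDecade y) PySem.Dict.empty
          (fun inner => inner.modify (pvCountry row) [] (· ++ [row])))

def group_data_by_decade_country (rows : List (List (String × String))) :
    List (String × List (String × List (List (String × String)))) :=
  match rows.foldl pvStepA (some PySem.Dict.empty) with
  | none => []  -- unreachable under Pre_: Python raised ValueError
  | some g => g.items.map (fun p => (p.1, p.2.items))

-- ===== PORT B =====
-- B's first loop: parse + filter into (decade, country, row) triples; none = ValueError
def pvStepB (acc : Option (List (String × String × List (String × String))))
    (row : List (String × String)) :
    Option (List (String × String × List (String × String))) :=
  match acc with
  | none => none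
  | some ts =>
    match pvYear row with
    | none => none
    | some y =>
      if y ≥ 1960 then some (ts ++ [(pvDecade y, pvCountry row, row)]) else some ts

def pvTriples (rows : List (List (String × String))) :
    Option (List (String × String × List (String × String))) :=
  rows.foldl pvStepB (some [])

-- the two dict comprehensions over dict.fromkeys (= PySem.List.dedup) with per-key filters
def group_data_by_decade_country_alt (rows : List (List (String × String))) :
    List (String × List (String × List (List (String × String)))) :=
  match pvTriples rows with
  | none => []  -- unreachable under Pre_: Python raised ValueError
  | some ts =>
    (PySem.List.dedup (ts.map (fun t => t.1))).map (fun d =>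
      (d, (PySem.List.dedup ((ts.filter (fun t => t.1 == d)).map (fun t => t.2.1))).map (fun c =>
        (c, (ts.filter (fun t => t.1 == d && t.2.1 == c)).map (fun t => t.2.2)))))

-- ===== PRECONDITION & SPEC =====
-- Pre_ excludes exactly the rows on which int(row.get("dob.year", 0)) raises ValueError.
def Pre_group_data_by_decade_country (rows : List (List (String × String))) : Prop :=
  (rows.all (fun row =>
    match PySem.Dict.get? (PySem.Dict.mk row) "dob.year" with
    | none => true
    | some s => (PySem.Int.ofStr? s).isSome)) = true

instance (rows : List (List (String × String))) : Decidable (Pre_group_data_by_decade_country rows) := by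
  unfold Pre_group_data_by_decade_country; infer_instance

def pvWitness_group_data_by_decade_country : (List (List (String × String))) :=
  [[("dob.year", "1975"), ("location.country", "UA")], [("dob.year", "1968")], [("name", "x")]]

def Spec_group_data_by_decade_country (rows : List (List (String × String))) (out : List (String × List (String × List (List (String × String))))) : Prop := out = group_data_by_decade_country_alt rows
instance (rows : List (List (String × String))) (out : List (String × List (String × List (List (String × String))))) : Decidable (Spec_group_data_by_decade_country rows out) := by
  unfold Spec_group_data_by_decade_country
  haveI h2 : DecidableEq (String × List (List (String × String))) := inferInstance
  haveI h3 : DecidableEq (List (String × List (List (String × String)))) := inferInstance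
  haveI h4 : DecidableEq (String × List (String × List (List (String × String)))) := inferInstance
  haveI h5 : DecidableEq (List (String × List (String × List (List (String × String))))) := inferInstance
  exact h5 out (group_data_by_decade_country_alt rows)

-- ===== CLAIM (what is proved, stated in full; the proofs are below) =====
def Claim_equal_group_data_by_decade_country : Prop := ∀ (rows : List (List (String × String))), Dom_group_data_by_decade_country rows → Pre_group_data_by_decade_country rows → Spec_group_data_by_decade_country rows (group_data_by_decade_country rows)

-- ===== LEMMAS AND PROOFS =====

-- A's nested insertion, as a function of one kept triple
def pvIns (g : PySem.Dict String (PySem.Dict String (List (List (String × String)))))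
    (t : String × String × List (String × String)) :
    PySem.Dict String (PySem.Dict String (List (List (String × String)))) :=
  g.modify t.1 PySem.Dict.empty (fun inner => inner.modify t.2.1 [] (· ++ [t.2.2]))

def pvBuild (ts : List (String × String × List (String × String))) :
    PySem.Dict String (PySem.Dict String (List (List (String × String)))) :=
  ts.foldl pvIns PySem.Dict.empty

-- A's loop over rows = B's triple collection followed by the nested insertions
theorem pvLoop_eq (rows : List (List (String × String)))
    (ots : Option (List (String × String × List (String × String)))) :
    rows.foldl pvStepA (ots.map pvBuild) = (rows.foldl pvStepB ots).map pvBuild := by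
  induction rows generalizing ots with
  | nil => rfl
  | cons r rs ih =>
    have hstep : pvStepA (ots.map pvBuild) r = (pvStepB ots r).map pvBuild := by
      cases ots with
      | none => rfl
      | some ts =>
        simp only [Option.map_some, pvStepA, pvStepB]
        cases pvYear r with
        | none => rfl
        | some y =>
          by_cases hy : y < 1960
          · simp [hy, show ¬ (y ≥ 1960) by omega]
          · simp only [if_neg hy, if_pos (show y ≥ 1960 by omega), Option.map_some]
            simp [pvBuild, List.foldl_append, pvIns]
    simp only [List.foldl_cons, hstep, ih]

-- value of the outer fold at one decade key: the inner fold over the matching pairs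
theorem pvGetD_build (ts : List (String × String × List (String × String)))
    (g0 : PySem.Dict String (PySem.Dict String (List (List (String × String))))) (d : String) :
    (ts.foldl pvIns g0).getD d PySem.Dict.empty =
    ((ts.filter (fun t => t.1 == d)).map (fun t => t.2)).foldl
      (fun inner p => inner.modify p.1 [] (· ++ [p.2])) (g0.getD d PySem.Dict.empty) := by
  induction ts generalizing g0 with
  | nil => rfl
  | cons t ts ih =>
    simp only [List.foldl_cons, List.filter_cons, ih]
    by_cases h : t.1 = d
    · simp only [h, beq_self_eq_true, if_pos, List.map_cons, List.foldl_cons]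
      congr 1
      simp only [pvIns, PySem.Dict.getD_modify, h]
      simp
    · have hb : (t.1 == d) = false := by simp [h]
      simp only [hb, Bool.false_eq_true, if_neg, not_false_eq_true]
      congr 1
      simp only [pvIns, PySem.Dict.getD_modify, if_neg (fun hc => h (Eq.symm hc))]

theorem pvBuild_items (ts : List (String × String × List (String × String))) :
    (pvBuild ts).items.map (fun p => (p.1, p.2.items)) =
    (PySem.List.dedup (ts.map (fun t => t.1))).map (fun d =>
      (d, (PySem.List.dedup ((ts.filter (fun t => t.1 == d)).map (fun t => t.2.1))).map (fun c =>
        (c, (ts.filter (fun t => t.1 == d && t.2.1 == c)).map (fun t => t.2.2))))) := by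
  have hnd : (pvBuild ts).keys.Nodup :=
    PySem.Dict.nodup_keys_foldl_modify_key ts (fun t => t.1) PySem.Dict.empty
      (fun _ t => fun inner => inner.modify t.2.1 [] (· ++ [t.2.2])) PySem.Dict.empty
      (by simp [PySem.Dict.keys_empty])
  have hkeys : (pvBuild ts).keys = PySem.List.dedup (ts.map (fun t => t.1)) := by
    have h1 : (pvBuild ts).keys =
        PySem.Set.update (PySem.Dict.empty :
          PySem.Dict String (PySem.Dict String (List (List (String × String))))).keys
          (ts.map (fun t => t.1)) :=
      PySem.Dict.keys_foldl_modify_key ts (fun t => t.1) PySem.Dict.empty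
        (fun _ t => fun inner => inner.modify t.2.1 [] (· ++ [t.2.2])) PySem.Dict.empty
    rw [h1, PySem.Dict.keys_empty, PySem.Set.update_nil_left, ← PySem.List.dedup_eq_ofList]
  rw [PySem.Dict.items_eq_map_keys _ hnd PySem.Dict.empty, List.map_map, hkeys]
  refine List.map_congr_left ?_
  intro d _
  simp only [Function.comp]
  have hinner : (pvBuild ts).getD d PySem.Dict.empty =
      ((ts.filter (fun t => t.1 == d)).map (fun t => t.2)).foldl
        (fun inner p => inner.modify p.1 [] (· ++ [p.2])) PySem.Dict.empty := by
    rw [pvBuild, pvGetD_build, PySem.Dict.getD_empty]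
  rw [hinner]
  congr 1
  have hnd2 : (((ts.filter (fun t => t.1 == d)).map (fun t => t.2)).foldl
      (fun inner p => inner.modify p.1 [] (· ++ [p.2])) PySem.Dict.empty).keys.Nodup :=
    PySem.Dict.nodup_keys_foldl_modify_key _
      (fun (p : String × List (String × String)) => p.1) []
      (fun _ p => (· ++ [p.2])) PySem.Dict.empty (by simp [PySem.Dict.keys_empty])
  have hkeys2 : (((ts.filter (fun t => t.1 == d)).map (fun t => t.2)).foldl
      (fun inner p => inner.modify p.1 [] (· ++ [p.2])) PySem.Dict.empty).keys =
      PySem.List.dedup ((ts.filter (fun t => t.1 == d)).map (fun t => t.2.1)) := by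
    have h2 : (((ts.filter (fun t => t.1 == d)).map (fun t => t.2)).foldl
        (fun inner p => inner.modify p.1 [] (· ++ [p.2])) PySem.Dict.empty).keys =
        PySem.Set.update (PySem.Dict.empty :
          PySem.Dict String (List (List (String × String)))).keys
          (((ts.filter (fun t => t.1 == d)).map (fun t => t.2)).map
            (fun (p : String × List (String × String)) => p.1)) :=
      PySem.Dict.keys_foldl_modify_key _
        (fun (p : String × List (String × String)) => p.1) []
        (fun _ p => (· ++ [p.2])) PySem.Dict.empty
    rw [h2, PySem.Dict.keys_empty, PySem.Set.update_nil_left, ← PySem.List.dedup_eq_ofList,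
      List.map_map]
    rfl
  rw [PySem.Dict.items_eq_map_keys _ hnd2 [], hkeys2]
  refine List.map_congr_left ?_
  intro c _
  rw [PySem.Dict.getD_foldl_modify_append, PySem.Dict.getD_empty, List.nil_append]
  congr 1
  rw [List.filter_map, List.map_map]
  show List.map (fun t => t.2.2) (List.filter (fun t => t.2.1 == c) (List.filter (fun t => t.1 == d) ts)) =
    List.map (fun t => t.2.2) (List.filter (fun t => t.1 == d && t.2.1 == c) ts)
  rw [List.filter_filter]
  congr 1
  exact List.filter_congr (fun a _ => by rw [Bool.and_comm])

-- ===== VERDICT (by name: the statement is the Claim_ definition above) =====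
theorem group_data_by_decade_country_spec : Claim_equal_group_data_by_decade_country := by
  intro rows _ _
  unfold Spec_group_data_by_decade_country group_data_by_decade_country group_data_by_decade_country_alt
  have h : rows.foldl pvStepA (some PySem.Dict.empty) = (rows.foldl pvStepB (some [])).map pvBuild :=
    pvLoop_eq rows (some [])
  rw [h]
  unfold pvTriples
  cases rows.foldl pvStepB (some []) with
  | none => rfl
  | some ts =>
    simp only [Option.map_some]
    exact pvBuild_items ts
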